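-- pv_equiv track=rewrite | github.com/dpowellm/stratum-lab | stratum_lab/query/fingerprint.py | _count_error_propagation_paths
-- ===== SOURCE A (Python) =====
-- from collections import defaultdict, deque
-- from typing import Any
--
-- _IRREVERSIBLE_EDGE_TYPES = frozenset({"writes_to", "sends_to", "calls"})
--
-- def _count_error_propagation_paths(
--     resolved_nodes: dict[str, dict[str, Any]],
--     resolved_edges: dict[str, dict[str, Any]],
-- ) -> int:
--     """Count structural error propagation paths.
--
--     An error propagation path is a directed path from a node that
--     interacts with an external service (or MCP server) to a node that
--     performs an irreversible action — meaning an error at the source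
--     could propagate and cause irreversible damage.
--
--     Returns the count of distinct (source, sink) pairs connected by a
--     directed path.
--     """
--     # Identify error-source nodes: nodes connected to external services
--     external_node_ids: set[str] = {
--         nid for nid, s in resolved_nodes.items()
--         if s.get("node_type", "") in ("external", "mcp_server")
--     }
--
--     # Nodes directly connected to external nodes (could receive errors)
--     error_source_nodes: set[str] = set()
--     for structural in resolved_edges.values():
--         source = structural.get("source", "")
--         target = structural.get("target", "")
--
--         if target in external_node_ids and source not in external_node_ids:
--             error_source_nodes.add(source)
--         if source in external_node_ids and target not in external_node_ids:
--             error_source_nodes.add(target)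
--
--     # Identify irreversible sink nodes
--     irreversible_sinks: set[str] = set()
--     for structural in resolved_edges.values():
--         edge_type = structural.get("edge_type", "")
--         source = structural.get("source", "")
--         if edge_type in _IRREVERSIBLE_EDGE_TYPES:
--             irreversible_sinks.add(source)
--
--     if not error_source_nodes or not irreversible_sinks:
--         return 0
--
--     # Build full adjacency for reachability
--     adj: dict[str, list[str]] = defaultdict(list)
--     for structural in resolved_edges.values():
--         source = structural.get("source", "")
--         target = structural.get("target", "")
--         if source and target:
--             adj[source].append(target)
--
--     # BFS from each error source to find reachable irreversible sinks
--     path_count = 0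
--     for err_source in error_source_nodes:
--         visited: set[str] = {err_source}
--         queue: deque[str] = deque([err_source])
--
--         while queue:
--             current = queue.popleft()
--
--             if current in irreversible_sinks and current != err_source:
--                 path_count += 1
--
--             for neighbor in adj.get(current, []):
--                 if neighbor not in visited:
--                     visited.add(neighbor)
--                     queue.append(neighbor)
--
--     return path_count
-- ===== SOURCE B (Python) =====
-- from collections import defaultdict
--
-- _IRREVERSIBLE_EDGE_TYPES = frozenset({"writes_to", "sends_to", "calls"})
--
--
-- def _count_error_propagation_paths(resolved_nodes, resolved_edges):
--     """Count (source, sink) pairs by one pass over the edges building the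
--     REVERSED graph, then one DFS per irreversible sink collecting the error
--     sources that can reach it."""
--     external = {
--         nid for nid, s in resolved_nodes.items()
--         if s.get("node_type", "") in ("external", "mcp_server")
--     }
--
--     error_sources = set()
--     sinks = set()
--     radj = defaultdict(list)  # reversed adjacency: target -> [sources]
--     for structural in resolved_edges.values():
--         source = structural.get("source", "")
--         target = structural.get("target", "")
--         if target in external and source not in external:
--             error_sources.add(source)
--         if source in external and target not in external:
--             error_sources.add(target)
--         if structural.get("edge_type", "") in _IRREVERSIBLE_EDGE_TYPES:
--             sinks.add(source)
--         if source and target: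
--             radj[target].append(source)
--
--     total = 0
--     for sink in sinks:
--         # nodes with a directed path TO `sink`: DFS on the reversed graph
--         seen = {sink}
--         stack = [sink]
--         while stack:
--             cur = stack.pop()
--             for prev in radj.get(cur, []):
--                 if prev not in seen:
--                     seen.add(prev)
--                     stack.append(prev)
--         total += sum(1 for s in error_sources if s != sink and s in seen)
--     return total
-- ===== Notes on version B (the rewrite author's own statement) =====
-- stated objective: alternative
-- what changed: Instead of a forward BFS with a queue from every error-source node, B makes one pass over the edges building the reversed adjacency (plus both node sets), then runs one stack-based DFS per irreversible sink on the reversed graph and counts the error sources that reach it.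
import Mathlib
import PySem

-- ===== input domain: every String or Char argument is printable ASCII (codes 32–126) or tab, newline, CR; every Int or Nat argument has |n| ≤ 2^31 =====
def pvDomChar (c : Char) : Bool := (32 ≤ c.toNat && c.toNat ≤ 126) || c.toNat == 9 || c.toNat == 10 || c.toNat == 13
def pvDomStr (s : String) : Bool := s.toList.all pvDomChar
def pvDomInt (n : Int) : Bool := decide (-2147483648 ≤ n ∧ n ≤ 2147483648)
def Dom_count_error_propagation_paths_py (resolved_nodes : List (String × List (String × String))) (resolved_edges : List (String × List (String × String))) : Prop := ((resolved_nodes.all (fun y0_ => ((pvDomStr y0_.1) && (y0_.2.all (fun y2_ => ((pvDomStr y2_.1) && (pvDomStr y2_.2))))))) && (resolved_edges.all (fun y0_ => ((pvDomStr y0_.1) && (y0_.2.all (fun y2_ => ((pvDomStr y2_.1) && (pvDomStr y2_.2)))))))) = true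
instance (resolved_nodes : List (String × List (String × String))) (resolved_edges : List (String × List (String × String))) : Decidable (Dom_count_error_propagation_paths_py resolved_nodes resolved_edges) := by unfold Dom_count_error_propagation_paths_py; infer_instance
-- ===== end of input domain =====

-- B replaces A's per-source forward BFS by one edge pass building the reversed graph
-- plus one stack DFS per irreversible sink (alternative algorithm, same result).

-- ===== shared helpers (identical Python lines in A and in B) =====
-- structural.get(k, "") on an inner dict
def pvGet (st : List (String × String)) (k : String) : String :=
  (PySem.Dict.ofList st).getD k ""

-- resolved_edges.values()
def pvEdgeVals (resolved_edges : List (String × List (String × String))) :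
    List (List (String × String)) :=
  (PySem.Dict.ofList resolved_edges).values

-- the external-node set comprehension (same line in Source A and Source B)
def pvExternal (resolved_nodes : List (String × List (String × String))) : PySem.Set String :=
  (PySem.Dict.ofList resolved_nodes).items.foldl
    (fun ext p =>
      if pvGet p.2 "node_type" = "external" ∨ pvGet p.2 "node_type" = "mcp_server"
      then PySem.Set.add ext p.1 else ext)
    PySem.Set.empty

-- edge_type in _IRREVERSIBLE_EDGE_TYPES
def pvIsIrrev (st : List (String × String)) : Bool :=
  pvGet st "edge_type" == "writes_to" || pvGet st "edge_type" == "sends_to" ||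
    pvGet st "edge_type" == "calls"

-- the identical inner 'for neighbor/prev in …: if not in visited: add; append' loop of both programs
def pvExpand (vq : PySem.Set String × List String) (nbrs : List String) :
    PySem.Set String × List String :=
  nbrs.foldl
    (fun vq nb =>
      if PySem.Set.contains vq.1 nb then vq else (PySem.Set.add vq.1 nb, vq.2 ++ [nb]))
    vq

-- ===== PORT A =====
def pvErrSourcesA (ext : PySem.Set String) (edgeVals : List (List (String × String))) :
    PySem.Set String :=
  edgeVals.foldl
    (fun es st =>
      let source := pvGet st "source"
      let target := pvGet st "target"
      let es := if PySem.Set.contains ext target && !PySem.Set.contains ext source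
                then PySem.Set.add es source else es
      if PySem.Set.contains ext source && !PySem.Set.contains ext target
      then PySem.Set.add es target else es)
    PySem.Set.empty

def pvSinksA (edgeVals : List (List (String × String))) : PySem.Set String :=
  edgeVals.foldl
    (fun ks st => if pvIsIrrev st then PySem.Set.add ks (pvGet st "source") else ks)
    PySem.Set.empty

def pvAdjA (edgeVals : List (List (String × String))) : PySem.Dict String (List String) :=
  edgeVals.foldl
    (fun d st =>
      let source := pvGet st "source"
      let target := pvGet st "target"
      if source ≠ "" ∧ target ≠ "" then d.modify source [] (· ++ [target]) else d)
    PySem.Dict.empty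

-- the 'while queue:' BFS loop; fuel (= len(edges)+1) bounds the number of dequeues:
-- every dequeued node was enqueued exactly once, and there is at most one enqueue
-- per adjacency entry plus the start node
def pvBfsLoopA (adj : PySem.Dict String (List String)) (sinks : PySem.Set String)
    (src : String) : Nat → PySem.Set String → List String → Int → Int
  | _, _, [], c => c
  | 0, _, _ :: _, c => c
  | fuel+1, visited, current :: queue, c =>
      let c := if PySem.Set.contains sinks current && current != src then c + 1 else c
      let vq := pvExpand (visited, queue) (adj.getD current [])
      pvBfsLoopA adj sinks src fuel vq.1 vq.2 c

def count_error_propagation_paths_py (resolved_nodes : List (String × List (String × String))) (resolved_edges : List (String × List (String × String))) : Int :=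
  let external := pvExternal resolved_nodes
  let edgeVals := pvEdgeVals resolved_edges
  let errSources := pvErrSourcesA external edgeVals
  let sinks := pvSinksA edgeVals
  if errSources = [] ∨ sinks = [] then 0
  else
    let adj := pvAdjA edgeVals
    errSources.foldl
      (fun pc s => pvBfsLoopA adj sinks s (edgeVals.length + 1) [s] [s] pc) 0

-- ===== PORT B =====
-- the single pass over resolved_edges.values() building error_sources, sinks and
-- the REVERSED adjacency radj
def pvScanB (ext : PySem.Set String) (edgeVals : List (List (String × String))) :
    PySem.Set String × PySem.Set String × PySem.Dict String (List String) :=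
  edgeVals.foldl
    (fun acc st =>
      let source := pvGet st "source"
      let target := pvGet st "target"
      let es := if PySem.Set.contains ext target && !PySem.Set.contains ext source
                then PySem.Set.add acc.1 source else acc.1
      let es := if PySem.Set.contains ext source && !PySem.Set.contains ext target
                then PySem.Set.add es target else es
      let ks := if pvIsIrrev st then PySem.Set.add acc.2.1 source else acc.2.1
      let rd := if source ≠ "" ∧ target ≠ ""
                then acc.2.2.modify target [] (· ++ [source]) else acc.2.2
      (es, ks, rd))
    (PySem.Set.empty, PySem.Set.empty, PySem.Dict.empty)

-- the 'while stack:' DFS loop (stack.pop() pops the LAST element); same fuel bound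
-- as A's loop: one push per reversed-adjacency entry plus the start node
def pvDfsLoopB (radj : PySem.Dict String (List String)) :
    Nat → PySem.Set String → List String → PySem.Set String
  | _, seen, [] => seen
  | 0, seen, _ :: _ => seen
  | fuel+1, seen, a :: rest0 =>
      let cur := (a :: rest0).getLast (List.cons_ne_nil a rest0)
      let stack := (a :: rest0).dropLast
      let ss := pvExpand (seen, stack) (radj.getD cur [])
      pvDfsLoopB radj fuel ss.1 ss.2

def count_error_propagation_paths_py_alt (resolved_nodes : List (String × List (String × String))) (resolved_edges : List (String × List (String × String))) : Int :=
  let external := pvExternal resolved_nodes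
  let edgeVals := pvEdgeVals resolved_edges
  let scan := pvScanB external edgeVals
  let errSources := scan.1
  let sinks := scan.2.1
  let radj := scan.2.2
  sinks.foldl
    (fun total sink =>
      let seen := pvDfsLoopB radj (edgeVals.length + 1) [sink] [sink]
      -- sum(1 for s in error_sources if s != sink and s in seen)
      total + ((errSources.filter (fun s => s != sink && PySem.Set.contains seen s)).length : Int))
    0

-- ===== PRECONDITION & SPEC =====
def Spec_count_error_propagation_paths_py (resolved_nodes : List (String × List (String × String))) (resolved_edges : List (String × List (String × String))) (out : Int) : Prop := out = count_error_propagation_paths_py_alt resolved_nodes resolved_edges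
instance (resolved_nodes : List (String × List (String × String))) (resolved_edges : List (String × List (String × String))) (out : Int) : Decidable (Spec_count_error_propagation_paths_py resolved_nodes resolved_edges out) := by unfold Spec_count_error_propagation_paths_py; infer_instance

-- ===== CLAIM (what is proved, stated in full; the proofs are below) =====
def Claim_equal_count_error_propagation_paths_py : Prop := ∀ (resolved_nodes : List (String × List (String × String))) (resolved_edges : List (String × List (String × String))), Dom_count_error_propagation_paths_py resolved_nodes resolved_edges → Spec_count_error_propagation_paths_py resolved_nodes resolved_edges (count_error_propagation_paths_py resolved_nodes resolved_edges)

-- ===== LEMMAS AND PROOFS =====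

-- reachability along a dict-of-adjacency-lists graph
def pvReach (g : PySem.Dict String (List String)) (a b : String) : Prop :=
  Relation.ReflTransGen (fun x y => y ∈ g.getD x []) a b

-- A's BFS loop, additionally returning the final visited set (proof layer only)
def pvBfsAuxA (adj : PySem.Dict String (List String)) (sinks : PySem.Set String)
    (src : String) : Nat → PySem.Set String → List String → Int → (PySem.Set String × Int)
  | _, visited, [], c => (visited, c)
  | 0, visited, _ :: _, c => (visited, c)
  | fuel+1, visited, current :: queue, c =>
      let c := if PySem.Set.contains sinks current && current != src then c + 1 else c
      let vq := pvExpand (visited, queue) (adj.getD current [])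
      pvBfsAuxA adj sinks src fuel vq.1 vq.2 c

theorem pvBfsLoopA_eq_aux (adj : PySem.Dict String (List String)) (sinks : PySem.Set String)
    (src : String) : ∀ (fuel : Nat) (v : PySem.Set String) (q : List String) (c : Int),
    pvBfsLoopA adj sinks src fuel v q c = (pvBfsAuxA adj sinks src fuel v q c).2 := by
  intro fuel
  induction fuel with
  | zero => intro v q c; cases q <;> simp [pvBfsLoopA, pvBfsAuxA]
  | succ n ih =>
    intro v q c
    cases q with
    | nil => simp [pvBfsLoopA, pvBfsAuxA]
    | cons a t =>
      simp only [pvBfsLoopA, pvBfsAuxA]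
      exact ih _ _ _

-- the shared inner loop appends the same block of new nodes to visited and to the worklist
theorem pvExpand_spec (L : List String) : ∀ (v q : List String),
    ∃ N, pvExpand (v, q) L = (v ++ N, q ++ N) ∧ N.Nodup ∧
      (∀ x ∈ N, x ∈ L ∧ x ∉ v) ∧ (∀ x ∈ L, x ∈ v ∨ x ∈ N) := by
  induction L with
  | nil => intro v q; exact ⟨[], by simp [pvExpand], by simp, by simp, by simp⟩
  | cons a L ih =>
    intro v q
    by_cases h : a ∈ v
    · obtain ⟨N, h1, h2, h3, h4⟩ := ih v q
      refine ⟨N, ?_, h2, ?_, ?_⟩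
      · rw [← h1]; simp [pvExpand, h]
      · intro x hx; exact ⟨List.mem_cons_of_mem _ (h3 x hx).1, (h3 x hx).2⟩
      · intro x hx
        rcases List.mem_cons.mp hx with rfl | hx
        · exact Or.inl h
        · exact h4 x hx
    · obtain ⟨N, h1, h2, h3, h4⟩ := ih (v ++ [a]) (q ++ [a])
      refine ⟨a :: N, ?_, ?_, ?_, ?_⟩
      · have step : pvExpand (v, q) (a :: L) = pvExpand (v ++ [a], q ++ [a]) L := by
          simp [pvExpand, h]
        rw [step, h1]; simp
      · refine List.nodup_cons.mpr ⟨fun hmem => ?_, h2⟩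
        exact (h3 a hmem).2 (by simp)
      · intro x hx
        rcases List.mem_cons.mp hx with rfl | hx
        · exact ⟨by simp, h⟩
        · obtain ⟨hL, hnv⟩ := h3 x hx
          exact ⟨List.mem_cons_of_mem _ hL, fun hxv => hnv (by simp [hxv])⟩
      · intro x hx
        rcases List.mem_cons.mp hx with rfl | hx
        · exact Or.inr (by simp)
        · rcases h4 x hx with hv | hN
          · rcases List.mem_append.mp hv with hv | hv
            · exact Or.inl hv
            · exact Or.inr (by simp at hv; simp [hv])
          · exact Or.inr (List.mem_cons_of_mem _ hN)

-- escape lemma: from a node of a closed-except-for-the-worklist visited set, any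
-- reachable node is visited or reachable from the worklist
theorem pvEscape (g : PySem.Dict String (List String)) (S Q : List String)
    (hclosed : ∀ u ∈ S, u ∈ Q ∨ ∀ v ∈ g.getD u [], v ∈ S)
    {w x : String} (hr : pvReach g w x) (hw : w ∈ S) :
    x ∈ S ∨ ∃ q ∈ Q, pvReach g q x := by
  induction hr using Relation.ReflTransGen.head_induction_on with
  | refl => exact Or.inl hw
  | head hstep htail ih =>
    rcases hclosed _ hw with hq | hcl
    · exact Or.inr ⟨_, hq, Relation.ReflTransGen.head hstep htail⟩
    · exact ih (hcl _ hstep)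

-- invariant lemma for A's BFS loop: final visited set = everything reachable from the
-- queue (or already visited), and the count grows by the P-count of the new nodes
theorem pvBfsAuxA_spec (adj : PySem.Dict String (List String)) (sinks : PySem.Set String)
    (src : String) (W : List String) (hW : ∀ u x, x ∈ adj.getD u [] → x ∈ W) :
    ∀ (fuel : Nat) (v q : List String) (c : Int),
      (∀ x ∈ q, x ∈ v) → v.Nodup → (∀ x ∈ v, x ∈ W) →
      (∀ u ∈ v, u ∈ q ∨ ∀ y ∈ adj.getD u [], y ∈ v) →
      q.length + W.length ≤ fuel + v.length →
      (pvBfsAuxA adj sinks src fuel v q c).1.Nodup ∧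
      (∀ x, x ∈ (pvBfsAuxA adj sinks src fuel v q c).1 ↔ x ∈ v ∨ ∃ p ∈ q, pvReach adj p x) ∧
      (pvBfsAuxA adj sinks src fuel v q c).2 +
          ((v.countP (fun t => PySem.Set.contains sinks t && t != src) : Nat) : Int) =
        c + (((pvBfsAuxA adj sinks src fuel v q c).1.countP
              (fun t => PySem.Set.contains sinks t && t != src) : Nat) : Int) +
          ((q.countP (fun t => PySem.Set.contains sinks t && t != src) : Nat) : Int) := by
  intro fuel
  induction fuel with
  | zero =>
    intro v q c hqv hnd hvW hcl hfuel
    cases q with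
    | nil =>
      refine ⟨by simpa [pvBfsAuxA] using hnd, ?_, by simp [pvBfsAuxA]⟩
      intro x; simp [pvBfsAuxA]
    | cons a t =>
      exfalso
      have hlen : v.length ≤ W.length := (hnd.subperm (fun x hx => hvW x hx)).length_le
      simp only [List.length_cons] at hfuel
      omega
  | succ n ih =>
    intro v q c hqv hnd hvW hcl hfuel
    cases q with
    | nil =>
      refine ⟨by simpa [pvBfsAuxA] using hnd, ?_, by simp [pvBfsAuxA]⟩
      intro x; simp [pvBfsAuxA]
    | cons cur qs =>
      obtain ⟨N, hE, hNnd, hNin, hLcov⟩ := pvExpand_spec (adj.getD cur []) v qs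
      have hcurv : cur ∈ v := hqv cur (by simp)
      have hqv' : ∀ x ∈ qs ++ N, x ∈ v ++ N := by
        intro x hx
        rcases List.mem_append.mp hx with hx | hx
        · exact List.mem_append.mpr (Or.inl (hqv x (List.mem_cons_of_mem _ hx)))
        · exact List.mem_append.mpr (Or.inr hx)
      have hnd' : (v ++ N).Nodup := by
        refine List.Nodup.append hnd hNnd ?_
        intro x hxv hxN
        exact (hNin x hxN).2 hxv
      have hvW' : ∀ x ∈ v ++ N, x ∈ W := by
        intro x hx
        rcases List.mem_append.mp hx with hx | hx
        · exact hvW x hx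
        · exact hW cur x (hNin x hx).1
      have hcl' : ∀ u ∈ v ++ N, u ∈ qs ++ N ∨ ∀ y ∈ adj.getD u [], y ∈ v ++ N := by
        intro u hu
        rcases List.mem_append.mp hu with hu | hu
        · rcases hcl u hu with hq | hc
          · rcases List.mem_cons.mp hq with rfl | hq
            · refine Or.inr ?_
              intro y hy
              rcases hLcov y hy with h | h
              · exact List.mem_append.mpr (Or.inl h)
              · exact List.mem_append.mpr (Or.inr h)
            · exact Or.inl (List.mem_append.mpr (Or.inl hq))
          · exact Or.inr fun y hy => List.mem_append.mpr (Or.inl (hc y hy))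
        · exact Or.inl (List.mem_append.mpr (Or.inr hu))
      have hfuel' : (qs ++ N).length + W.length ≤ n + (v ++ N).length := by
        simp only [List.length_append, List.length_cons] at hfuel ⊢
        omega
      have IH := ih (v ++ N) (qs ++ N)
        (if PySem.Set.contains sinks cur && cur != src then c + 1 else c)
        hqv' hnd' hvW' hcl' hfuel'
      have hstep : pvBfsAuxA adj sinks src (n+1) v (cur :: qs) c
          = pvBfsAuxA adj sinks src n (v ++ N) (qs ++ N)
              (if PySem.Set.contains sinks cur && cur != src then c + 1 else c) := by
        simp only [pvBfsAuxA, hE]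
      rw [hstep]
      refine ⟨IH.1, ?_, ?_⟩
      · intro x
        rw [IH.2.1 x]
        constructor
        · rintro (hx | ⟨p, hp, hr⟩)
          · rcases List.mem_append.mp hx with hx | hx
            · exact Or.inl hx
            · exact Or.inr ⟨cur, by simp, Relation.ReflTransGen.single (hNin x hx).1⟩
          · rcases List.mem_append.mp hp with hp | hp
            · exact Or.inr ⟨p, List.mem_cons_of_mem _ hp, hr⟩
            · exact Or.inr ⟨cur, by simp,
                Relation.ReflTransGen.trans (Relation.ReflTransGen.single (hNin p hp).1) hr⟩
        · rintro (hx | ⟨p, hp, hr⟩)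
          · exact Or.inl (List.mem_append.mpr (Or.inl hx))
          · rcases List.mem_cons.mp hp with rfl | hp
            · exact pvEscape adj (v ++ N) (qs ++ N) hcl' hr
                (List.mem_append.mpr (Or.inl hcurv))
            · exact Or.inr ⟨p, List.mem_append.mpr (Or.inl hp), hr⟩
      · have hcnt := IH.2.2
        rw [List.countP_append, List.countP_append] at hcnt
        rw [List.countP_cons]
        cases hb : (PySem.Set.contains sinks cur && cur != src) <;>
          simp only [hb, if_true, if_false, Bool.false_eq_true] at hcnt ⊢ <;>
          push_cast at hcnt ⊢ <;> omega

-- invariant lemma for B's DFS loop: final seen set = everything reachable from the stack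
theorem pvDfsLoopB_spec (radj : PySem.Dict String (List String)) (W : List String)
    (hW : ∀ u x, x ∈ radj.getD u [] → x ∈ W) :
    ∀ (fuel : Nat) (seen stack : List String),
      (∀ x ∈ stack, x ∈ seen) → seen.Nodup → (∀ x ∈ seen, x ∈ W) →
      (∀ u ∈ seen, u ∈ stack ∨ ∀ y ∈ radj.getD u [], y ∈ seen) →
      stack.length + W.length ≤ fuel + seen.length →
      (pvDfsLoopB radj fuel seen stack).Nodup ∧
      (∀ x, x ∈ pvDfsLoopB radj fuel seen stack ↔ x ∈ seen ∨ ∃ p ∈ stack, pvReach radj p x) := by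
  intro fuel
  induction fuel with
  | zero =>
    intro seen stack hqv hnd hvW hcl hfuel
    cases stack with
    | nil =>
      refine ⟨by simpa [pvDfsLoopB] using hnd, ?_⟩
      intro x; simp [pvDfsLoopB]
    | cons a t =>
      exfalso
      have hlen : seen.length ≤ W.length := (hnd.subperm (fun x hx => hvW x hx)).length_le
      simp only [List.length_cons] at hfuel
      omega
  | succ n ih =>
    intro seen stack hqv hnd hvW hcl hfuel
    cases stack with
    | nil =>
      refine ⟨by simpa [pvDfsLoopB] using hnd, ?_⟩
      intro x; simp [pvDfsLoopB]
    | cons a rest0 =>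
      have hsplit : (a :: rest0).dropLast ++ [(a :: rest0).getLast (List.cons_ne_nil a rest0)]
          = a :: rest0 := List.dropLast_append_getLast _
      have hmem : ∀ u, u ∈ a :: rest0 ↔
          u ∈ (a :: rest0).dropLast ∨ u = (a :: rest0).getLast (List.cons_ne_nil a rest0) := by
        intro u
        conv_lhs => rw [← hsplit]
        simp
      have hcurstack : (a :: rest0).getLast (List.cons_ne_nil a rest0) ∈ a :: rest0 :=
        (hmem _).mpr (Or.inr rfl)
      have hcurv : (a :: rest0).getLast (List.cons_ne_nil a rest0) ∈ seen := hqv _ hcurstack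
      obtain ⟨N, hE, hNnd, hNin, hLcov⟩ :=
        pvExpand_spec (radj.getD ((a :: rest0).getLast (List.cons_ne_nil a rest0)) [])
          seen (a :: rest0).dropLast
      have hqv' : ∀ x ∈ (a :: rest0).dropLast ++ N, x ∈ seen ++ N := by
        intro x hx
        rcases List.mem_append.mp hx with hx | hx
        · exact List.mem_append.mpr (Or.inl (hqv x ((hmem x).mpr (Or.inl hx))))
        · exact List.mem_append.mpr (Or.inr hx)
      have hnd' : (seen ++ N).Nodup := by
        refine List.Nodup.append hnd hNnd ?_
        intro x hxv hxN
        exact (hNin x hxN).2 hxv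
      have hvW' : ∀ x ∈ seen ++ N, x ∈ W := by
        intro x hx
        rcases List.mem_append.mp hx with hx | hx
        · exact hvW x hx
        · exact hW _ x (hNin x hx).1
      have hcl' : ∀ u ∈ seen ++ N, u ∈ (a :: rest0).dropLast ++ N ∨
          ∀ y ∈ radj.getD u [], y ∈ seen ++ N := by
        intro u hu
        rcases List.mem_append.mp hu with hu | hu
        · rcases hcl u hu with hq | hc
          · rcases (hmem u).mp hq with hq | rfl
            · exact Or.inl (List.mem_append.mpr (Or.inl hq))
            · refine Or.inr ?_
              intro y hy
              rcases hLcov y hy with h | h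
              · exact List.mem_append.mpr (Or.inl h)
              · exact List.mem_append.mpr (Or.inr h)
          · exact Or.inr fun y hy => List.mem_append.mpr (Or.inl (hc y hy))
        · exact Or.inl (List.mem_append.mpr (Or.inr hu))
      have hfuel' : ((a :: rest0).dropLast ++ N).length + W.length ≤ n + (seen ++ N).length := by
        have hlen2 : (a :: rest0).dropLast.length + 1 = (a :: rest0).length := by
          simp
        simp only [List.length_append] at hfuel ⊢
        simp only [List.length_cons] at hfuel hlen2
        omega
      have IH := ih (seen ++ N) ((a :: rest0).dropLast ++ N) hqv' hnd' hvW' hcl' hfuel'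
      have hstep : pvDfsLoopB radj (n+1) seen (a :: rest0)
          = pvDfsLoopB radj n (seen ++ N) ((a :: rest0).dropLast ++ N) := by
        simp only [pvDfsLoopB, hE]
      rw [hstep]
      refine ⟨IH.1, ?_⟩
      intro x
      rw [IH.2 x]
      constructor
      · rintro (hx | ⟨p, hp, hr⟩)
        · rcases List.mem_append.mp hx with hx | hx
          · exact Or.inl hx
          · exact Or.inr ⟨_, hcurstack, Relation.ReflTransGen.single (hNin x hx).1⟩
        · rcases List.mem_append.mp hp with hp | hp
          · exact Or.inr ⟨p, (hmem p).mpr (Or.inl hp), hr⟩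
          · exact Or.inr ⟨_, hcurstack,
              Relation.ReflTransGen.trans (Relation.ReflTransGen.single (hNin p hp).1) hr⟩
      · rintro (hx | ⟨p, hp, hr⟩)
        · exact Or.inl (List.mem_append.mpr (Or.inl hx))
        · rcases (hmem p).mp hp with hp | rfl
          · exact Or.inr ⟨p, List.mem_append.mpr (Or.inl hp), hr⟩
          · exact pvEscape radj (seen ++ N) ((a :: rest0).dropLast ++ N) hcl' hr
              (List.mem_append.mpr (Or.inl hcurv))

-- a foldl building a dict of appended lists: membership characterisation
theorem pvFoldModify_getD (k w : List (String × String) → String)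
    (cnd : List (String × String) → Prop) [DecidablePred cnd] :
    ∀ (l : List (List (String × String))) (d0 : PySem.Dict String (List String)) (y x : String),
      (x ∈ (l.foldl (fun d st => if cnd st then d.modify (k st) [] (· ++ [w st]) else d) d0).getD y []) ↔
        x ∈ d0.getD y [] ∨ ∃ st ∈ l, cnd st ∧ k st = y ∧ w st = x := by
  intro l
  induction l with
  | nil => intro d0 y x; simp
  | cons hd tl ih =>
    intro d0 y x
    simp only [List.foldl_cons, ih]
    by_cases hc : cnd hd
    · rw [if_pos hc, PySem.Dict.getD_modify]
      by_cases hy : y = k hd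
      · subst hy
        rw [if_pos rfl]
        simp only [List.mem_append, List.mem_singleton]
        constructor
        · rintro ((h | h) | ⟨st, hst, hrest⟩)
          · exact Or.inl h
          · exact Or.inr ⟨hd, List.mem_cons_self .., hc, rfl, h.symm⟩
          · exact Or.inr ⟨st, List.mem_cons_of_mem _ hst, hrest⟩
        · rintro (h | ⟨st, hst, hcs, hks, hws⟩)
          · exact Or.inl (Or.inl h)
          · rcases List.mem_cons.mp hst with rfl | hst
            · exact Or.inl (Or.inr hws.symm)
            · exact Or.inr ⟨st, hst, hcs, hks, hws⟩
      · rw [if_neg hy]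
        constructor
        · rintro (h | ⟨st, hst, hrest⟩)
          · exact Or.inl h
          · exact Or.inr ⟨st, List.mem_cons_of_mem _ hst, hrest⟩
        · rintro (h | ⟨st, hst, hcs, hks, hws⟩)
          · exact Or.inl h
          · rcases List.mem_cons.mp hst with rfl | hst
            · exact absurd hks.symm hy
            · exact Or.inr ⟨st, hst, hcs, hks, hws⟩
    · rw [if_neg hc]
      constructor
      · rintro (h | ⟨st, hst, hrest⟩)
        · exact Or.inl h
        · exact Or.inr ⟨st, List.mem_cons_of_mem _ hst, hrest⟩
      · rintro (h | ⟨st, hst, hcs, hks, hws⟩)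
        · exact Or.inl h
        · rcases List.mem_cons.mp hst with rfl | hst
          · exact absurd hcs hc
          · exact Or.inr ⟨st, hst, hcs, hks, hws⟩

-- B's single scan is A's three separate folds
theorem pvScanB_eq (ext : PySem.Set String) :
    ∀ (l : List (List (String × String))) (es ks : PySem.Set String)
      (rd : PySem.Dict String (List String)),
      l.foldl
        (fun acc st =>
          let source := pvGet st "source"
          let target := pvGet st "target"
          let es := if PySem.Set.contains ext target && !PySem.Set.contains ext source
                    then PySem.Set.add acc.1 source else acc.1
          let es := if PySem.Set.contains ext source && !PySem.Set.contains ext target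
                    then PySem.Set.add es target else es
          let ks := if pvIsIrrev st then PySem.Set.add acc.2.1 source else acc.2.1
          let rd := if source ≠ "" ∧ target ≠ ""
                    then acc.2.2.modify target [] (· ++ [source]) else acc.2.2
          (es, ks, rd))
        (es, ks, rd) =
      (l.foldl
        (fun es st =>
          let source := pvGet st "source"
          let target := pvGet st "target"
          let es := if PySem.Set.contains ext target && !PySem.Set.contains ext source
                    then PySem.Set.add es source else es
          if PySem.Set.contains ext source && !PySem.Set.contains ext target
          then PySem.Set.add es target else es) es,
       l.foldl (fun ks st => if pvIsIrrev st then PySem.Set.add ks (pvGet st "source") else ks) ks,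
       l.foldl
        (fun d st =>
          if pvGet st "source" ≠ "" ∧ pvGet st "target" ≠ ""
          then d.modify (pvGet st "target") [] (· ++ [pvGet st "source"]) else d) rd) := by
  intro l
  induction l with
  | nil => intro es ks rd; rfl
  | cons hd tl ih =>
    intro es ks rd
    simp only [List.foldl_cons]
    exact ih _ _ _

theorem pvScanB_unfold (ext : PySem.Set String) (ev : List (List (String × String))) :
    pvScanB ext ev = (pvErrSourcesA ext ev, pvSinksA ev,
      ev.foldl
        (fun d st =>
          if pvGet st "source" ≠ "" ∧ pvGet st "target" ≠ ""
          then d.modify (pvGet st "target") [] (· ++ [pvGet st "source"]) else d)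
        PySem.Dict.empty) := by
  unfold pvScanB pvErrSourcesA pvSinksA
  exact pvScanB_eq ext ev PySem.Set.empty PySem.Set.empty PySem.Dict.empty

-- the forward graph and B's reversed graph have opposite edges, hence opposite reachability
theorem pvStep_iff (ext : PySem.Set String) (ev : List (List (String × String))) (a b : String) :
    b ∈ (pvAdjA ev).getD a [] ↔ a ∈ (pvScanB ext ev).2.2.getD b [] := by
  have hA := pvFoldModify_getD (fun st => pvGet st "source") (fun st => pvGet st "target")
      (fun st => pvGet st "source" ≠ "" ∧ pvGet st "target" ≠ "") ev PySem.Dict.empty a b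
  have hB := pvFoldModify_getD (fun st => pvGet st "target") (fun st => pvGet st "source")
      (fun st => pvGet st "source" ≠ "" ∧ pvGet st "target" ≠ "") ev PySem.Dict.empty b a
  simp only [PySem.Dict.getD_empty, List.not_mem_nil, false_or] at hA hB
  rw [pvScanB_unfold]
  constructor
  · intro h
    obtain ⟨st, hst, hc, hk, hw⟩ := hA.mp h
    exact hB.mpr ⟨st, hst, hc, hw, hk⟩
  · intro h
    obtain ⟨st, hst, hc, hk, hw⟩ := hB.mp h
    exact hA.mpr ⟨st, hst, hc, hw, hk⟩

theorem pvReach_flip {r r' : String → String → Prop} (h : ∀ a b, r a b ↔ r' b a)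
    {a b : String} (hab : Relation.ReflTransGen r a b) : Relation.ReflTransGen r' b a := by
  induction hab with
  | refl => exact Relation.ReflTransGen.refl
  | tail _ hbc ih => exact Relation.ReflTransGen.head ((h _ _).mp hbc) ih

theorem pvReach_iff (ext : PySem.Set String) (ev : List (List (String × String))) (a b : String) :
    pvReach (pvAdjA ev) a b ↔ pvReach (pvScanB ext ev).2.2 b a := by
  constructor
  · exact fun h => pvReach_flip (fun a b => pvStep_iff ext ev a b) h
  · exact fun h => pvReach_flip (fun a b => (pvStep_iff ext ev b a).symm) h

-- counting an intersection from either side (both lists without duplicates)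
theorem pvCountSwap (X Y : List String) (f : String → Bool) (hX : X.Nodup) (hY : Y.Nodup) :
    Y.countP (fun y => X.contains y && f y) = X.countP (fun x => Y.contains x && f x) := by
  have h1 : (Y.filter (fun y => X.contains y && f y)).Nodup := hY.filter _
  have h2 : (X.filter (fun x => Y.contains x && f x)).Nodup := hX.filter _
  have hperm : (Y.filter (fun y => X.contains y && f y)).Perm
      (X.filter (fun x => Y.contains x && f x)) := by
    refine (List.perm_ext_iff_of_nodup h1 h2).mpr ?_
    intro z
    simp only [List.mem_filter, Bool.and_eq_true, List.contains_iff_mem]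
    tauto
  rw [List.countP_eq_length_filter, List.countP_eq_length_filter, hperm.length_eq]

-- double counting: summing rows equals summing columns
theorem pvDoubleCount (S T : List String) (p : String → String → Bool) :
    (S.map (fun s => ((T.countP (fun t => p s t) : Nat) : Int))).sum =
    (T.map (fun t => ((S.countP (fun s => p s t) : Nat) : Int))).sum := by
  induction S with
  | nil =>
    simp only [List.map_nil, List.sum_nil, List.countP_nil, Nat.cast_zero]
    rw [PySem.List.sum_map_const_int]
    ring
  | cons s S ih =>
    simp only [List.map_cons, List.sum_cons, List.countP_cons]
    rw [ih]
    have : (T.map (fun t => ((List.countP (fun s_1 => p s_1 t) S + if p s t then 1 else 0 : Nat) : Int))).sum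
        = (T.map (fun t => ((List.countP (fun s_1 => p s_1 t) S : Nat) : Int))).sum
          + (T.map (fun t => if p s t then (1 : Int) else 0)).sum := by
      rw [← PySem.List.sum_map_add_int]
      apply congrArg
      apply List.map_congr_left
      intro t _
      push_cast
      split <;> simp
    rw [this, PySem.List.sum_map_ite_one_zero]
    ring

-- sets built by conditional adds have no duplicates
theorem pvNodupFoldAdd {α : Type} (step : PySem.Set String → α → PySem.Set String)
    (hstep : ∀ s a, s.Nodup → (step s a).Nodup) :
    ∀ (l : List α) (s : PySem.Set String), s.Nodup → (l.foldl step s).Nodup := by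
  intro l
  induction l with
  | nil => intro s hs; simpa using hs
  | cons a l ih => intro s hs; simpa using ih _ (hstep s a hs)

-- characterisation of A's BFS from a single source: visited = reachable set, count = P-count of it
theorem pvBfsChar (ev : List (List (String × String))) (sinks : PySem.Set String)
    (s : String) (pc : Int) :
    (pvBfsAuxA (pvAdjA ev) sinks s (ev.length + 1) [s] [s] pc).1.Nodup ∧
    (∀ x, x ∈ (pvBfsAuxA (pvAdjA ev) sinks s (ev.length + 1) [s] [s] pc).1 ↔
        pvReach (pvAdjA ev) s x) ∧
    (pvBfsAuxA (pvAdjA ev) sinks s (ev.length + 1) [s] [s] pc).2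
      = pc + (((pvBfsAuxA (pvAdjA ev) sinks s (ev.length + 1) [s] [s] pc).1.countP
          (fun t => PySem.Set.contains sinks t && t != s) : Nat) : Int) := by
  have hWA : ∀ u x, x ∈ (pvAdjA ev).getD u [] → x ∈ s :: ev.map (fun st => pvGet st "target") := by
    intro u x hx
    have hchar := pvFoldModify_getD (fun st => pvGet st "source") (fun st => pvGet st "target")
        (fun st => pvGet st "source" ≠ "" ∧ pvGet st "target" ≠ "") ev PySem.Dict.empty u x
    rcases hchar.mp hx with h0 | ⟨st, hst, _, _, hw⟩
    · simp at h0
    · exact List.mem_cons_of_mem _ (List.mem_map.mpr ⟨st, hst, hw⟩)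
  have HS := pvBfsAuxA_spec (pvAdjA ev) sinks s (s :: ev.map (fun st => pvGet st "target")) hWA
      (ev.length + 1) [s] [s] pc (fun x hx => hx) (by simp)
      (by intro x hx; simp at hx; subst hx; simp) (fun u hu => Or.inl hu)
      (by simp only [List.length_cons, List.length_map]; omega)
  refine ⟨HS.1, ?_, ?_⟩
  · intro x
    rw [HS.2.1 x]
    constructor
    · rintro (hx | ⟨p, hp, hr⟩)
      · simp at hx; subst hx; exact Relation.ReflTransGen.refl
      · simp at hp; subst hp; exact hr
    · intro hr; exact Or.inr ⟨s, by simp, hr⟩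
  · have h22 := HS.2.2
    have h0 : List.countP (fun t => PySem.Set.contains sinks t && t != s) [s] = 0 := by simp
    rw [h0] at h22
    push_cast at h22 ⊢
    omega

-- characterisation of B's DFS from a single sink on the reversed graph
theorem pvDfsChar (ext : PySem.Set String) (ev : List (List (String × String))) (t : String) :
    (pvDfsLoopB (pvScanB ext ev).2.2 (ev.length + 1) [t] [t]).Nodup ∧
    ∀ x, x ∈ pvDfsLoopB (pvScanB ext ev).2.2 (ev.length + 1) [t] [t] ↔
        pvReach (pvScanB ext ev).2.2 t x := by
  have hWR : ∀ u x, x ∈ (pvScanB ext ev).2.2.getD u [] →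
      x ∈ t :: ev.map (fun st => pvGet st "source") := by
    intro u x hx
    rw [pvScanB_unfold] at hx
    have hchar := pvFoldModify_getD (fun st => pvGet st "target") (fun st => pvGet st "source")
        (fun st => pvGet st "source" ≠ "" ∧ pvGet st "target" ≠ "") ev PySem.Dict.empty u x
    rcases hchar.mp hx with h0 | ⟨st, hst, _, _, hw⟩
    · simp at h0
    · exact List.mem_cons_of_mem _ (List.mem_map.mpr ⟨st, hst, hw⟩)
  have HS := pvDfsLoopB_spec _ _ hWR (ev.length + 1) [t] [t] (fun x hx => hx) (by simp)
      (by intro x hx; simp at hx; subst hx; simp) (fun u hu => Or.inl hu)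
      (by simp only [List.length_cons, List.length_map]; omega)
  refine ⟨HS.1, ?_⟩
  intro x
  rw [HS.2 x]
  constructor
  · rintro (hx | ⟨p, hp, hr⟩)
    · simp at hx; subst hx; exact Relation.ReflTransGen.refl
    · simp at hp; subst hp; exact hr
  · intro hr; exact Or.inr ⟨t, by simp, hr⟩

-- the value of one of A's BFS runs, re-expressed as a count over the sink list using B's DFS sets
theorem pvBfsValue (ext : PySem.Set String) (ev : List (List (String × String)))
    (hTnd : (pvSinksA ev).Nodup) (pc : Int) (s : String) :
    pvBfsLoopA (pvAdjA ev) (pvSinksA ev) s (ev.length + 1) [s] [s] pc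
      = pc + (((pvSinksA ev).countP (fun t =>
          (pvDfsLoopB (pvScanB ext ev).2.2 (ev.length + 1) [t] [t]).contains s && (s != t)) : Nat) : Int) := by
  rw [pvBfsLoopA_eq_aux]
  obtain ⟨hnd, hmem, hval⟩ := pvBfsChar ev (pvSinksA ev) s pc
  rw [hval]
  congr 2
  have e1 : (pvBfsAuxA (pvAdjA ev) (pvSinksA ev) s (ev.length + 1) [s] [s] pc).1.countP
        (fun t => PySem.Set.contains (pvSinksA ev) t && t != s)
      = (pvSinksA ev).countP (fun x =>
          (pvBfsAuxA (pvAdjA ev) (pvSinksA ev) s (ev.length + 1) [s] [s] pc).1.contains x && (x != s)) :=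
    pvCountSwap (pvSinksA ev) _ (fun y => y != s) hTnd hnd
  rw [e1]
  refine List.countP_congr ?_
  intro t _
  have hcont : (pvBfsAuxA (pvAdjA ev) (pvSinksA ev) s (ev.length + 1) [s] [s] pc).1.contains t
      = (pvDfsLoopB (pvScanB ext ev).2.2 (ev.length + 1) [t] [t]).contains s := by
    apply Bool.eq_iff_iff.mpr
    constructor
    · intro h
      have hm := (hmem t).mp (by simpa using h)
      have hr := (pvReach_iff ext ev s t).mp hm
      simpa using ((pvDfsChar ext ev t).2 s).mpr hr
    · intro h
      have hm := ((pvDfsChar ext ev t).2 s).mp (by simpa using h)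
      have hr := (pvReach_iff ext ev s t).mpr hm
      simpa using (hmem t).mpr hr
  have hbne : (t != s) = (s != t) := by
    by_cases h : t = s
    · subst h; rfl
    · have h1 : (t == s) = false := by simpa using h
      have h2 : (s == t) = false := by simpa using Ne.symm h
      simp [bne, h1, h2]
  rw [hcont, hbne]

-- the two programs, with the shared quantities made explicit
theorem pvMain (ext : PySem.Set String) (ev : List (List (String × String))) :
    (if pvErrSourcesA ext ev = [] ∨ pvSinksA ev = [] then (0 : Int)
     else (pvErrSourcesA ext ev).foldl
        (fun pc s => pvBfsLoopA (pvAdjA ev) (pvSinksA ev) s (ev.length + 1) [s] [s] pc) 0)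
    = (pvScanB ext ev).2.1.foldl
        (fun total sink =>
          total + (((pvScanB ext ev).1.filter
            (fun s => s != sink && PySem.Set.contains
              (pvDfsLoopB (pvScanB ext ev).2.2 (ev.length + 1) [sink] [sink]) s)).length : Int)) 0 := by
  have h1 : (pvScanB ext ev).1 = pvErrSourcesA ext ev := by rw [pvScanB_unfold]
  have h2 : (pvScanB ext ev).2.1 = pvSinksA ev := by rw [pvScanB_unfold]
  have hTnd : (pvSinksA ev).Nodup := by
    unfold pvSinksA
    refine pvNodupFoldAdd _ ?_ ev PySem.Set.empty List.nodup_nil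
    intro s a hs
    dsimp only
    split
    · exact PySem.Set.nodup_add _ _ hs
    · exact hs
  by_cases hST : pvErrSourcesA ext ev = [] ∨ pvSinksA ev = []
  · rw [if_pos hST]
    rcases hST with hS | hT
    · simp only [h1, hS, List.filter_nil, List.length_nil, Nat.cast_zero, add_zero]
      rw [List.foldl_fixed]
    · simp only [h2, hT, List.foldl_nil]
  · rw [if_neg hST]
    simp only [h1, h2]
    rw [PySem.List.foldl_congr_mem _ _
        (fun pc s => pc + (((pvSinksA ev).countP (fun t =>
          (pvDfsLoopB (pvScanB ext ev).2.2 (ev.length + 1) [t] [t]).contains s && (s != t)) : Nat) : Int)) 0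
        (fun pc s _ => pvBfsValue ext ev hTnd pc s)]
    rw [PySem.List.foldl_congr_mem (pvSinksA ev)
        (fun total sink =>
          total + (((pvErrSourcesA ext ev).filter
            (fun s => s != sink && PySem.Set.contains
              (pvDfsLoopB (pvScanB ext ev).2.2 (ev.length + 1) [sink] [sink]) s)).length : Int))
        (fun total t => total + (((pvErrSourcesA ext ev).countP (fun s =>
          (pvDfsLoopB (pvScanB ext ev).2.2 (ev.length + 1) [t] [t]).contains s && (s != t)) : Nat) : Int)) 0
        ?_]
    · rw [PySem.List.foldl_add, PySem.List.foldl_add]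
      simp only [zero_add]
      exact pvDoubleCount (pvErrSourcesA ext ev) (pvSinksA ev)
        (fun s t => (pvDfsLoopB (pvScanB ext ev).2.2 (ev.length + 1) [t] [t]).contains s && (s != t))
    · intro total t _
      dsimp only
      congr 1
      apply congrArg (fun n : Nat => (n : Int))
      rw [← List.countP_eq_length_filter]
      exact List.countP_congr (fun a _ => by rw [Bool.and_comm])

-- ===== VERDICT (by name: the statement is the Claim_ definition above) =====
theorem count_error_propagation_paths_py_spec : Claim_equal_count_error_propagation_paths_py := by
  intro rn re _
  show count_error_propagation_paths_py rn re = count_error_propagation_paths_py_alt rn re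
  exact pvMain (pvExternal rn) (pvEdgeVals re)
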